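-- pv_equiv track=rewrite | github.com/IKunal007/medical-rag-chatbot | app/report/assembler.py | split_table_by_columns
-- ===== SOURCE A (Python) =====
-- def split_table_by_columns(rows, max_data_cols=3):
--     header = rows[0]
--     body = rows[1:]
--
--     fixed_cols = 1  # first column is row label
--     data_cols = len(header) - fixed_cols
--
--     tables = []
--     start = 0
--
--     while start < data_cols:
--         end = min(start + max_data_cols, data_cols)
--
--         cols = [0] + list(range(fixed_cols + start, fixed_cols + end))
--
--         # SAFE slicing
--         split_header = [header[i] for i in cols if i < len(header)]
--         split_rows = [split_header]
--
--         for row in body: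
--             split_row = [row[i] for i in cols if i < len(row)]
--             split_rows.append(split_row)
--
--         tables.append(split_rows)
--         start = end
--
--     return tables
-- ===== SOURCE B (Python) =====
-- def split_table_by_columns(rows, max_data_cols=3):
--     data_cols = len(rows[0]) - 1
--     if data_cols <= 0:
--         return []
--     bounds = [(s, min(s + max_data_cols, data_cols))
--               for s in range(0, data_cols, max_data_cols)]
--     tables = [[] for _ in bounds]
--     for row in rows:
--         for table, (s, e) in zip(tables, bounds):
--             table.append(row[:1] + row[1 + s:1 + e])
--     return tables
-- ===== Notes on version B (the rewrite author's own statement) =====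
-- stated objective: alternative
-- what changed: B precomputes the chunk boundary pairs once, creates one empty bucket per chunk, and makes a single pass over all rows (header treated uniformly) appending row[:1] + row[1+s:1+e] to every bucket, instead of A's outer while loop that rebuilds an index list and rescans the whole body once per chunk.
import Mathlib
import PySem

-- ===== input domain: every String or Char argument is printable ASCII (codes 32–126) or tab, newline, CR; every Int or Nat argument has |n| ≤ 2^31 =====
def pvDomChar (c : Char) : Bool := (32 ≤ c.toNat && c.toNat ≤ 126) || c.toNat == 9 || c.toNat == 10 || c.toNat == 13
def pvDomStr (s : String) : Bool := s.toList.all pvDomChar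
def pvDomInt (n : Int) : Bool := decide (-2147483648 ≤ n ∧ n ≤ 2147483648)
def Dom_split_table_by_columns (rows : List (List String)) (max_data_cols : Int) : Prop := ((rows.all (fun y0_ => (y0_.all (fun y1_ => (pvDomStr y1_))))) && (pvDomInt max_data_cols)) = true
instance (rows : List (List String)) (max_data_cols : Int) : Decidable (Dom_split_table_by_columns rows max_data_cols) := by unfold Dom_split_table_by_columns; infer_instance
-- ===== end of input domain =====

-- B splits the table with one pass over all rows, distributing each row into per-chunk buckets
-- computed up front, instead of A's per-chunk rescan of the body; equivalence of return values.

-- ===== PORT A =====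
-- [row[i] for i in cols if i < len(row)]
def pvPick (row : List String) (cols : List Int) : List String :=
  (cols.filter (fun i => decide (i < (row.length : Int)))).map
    (fun i => PySem.List.pyGetD row i "")

-- the 'while start < data_cols' loop; fuel bounds the iteration count (start strictly
-- increases each round when 0 < max_data_cols, which Pre_ guarantees whenever the loop runs)
def pvLoopA (header : List String) (body : List (List String))
    (data_cols max_data_cols : Int) : Nat → Int → List (List (List String))
  | 0, _ => []
  | fuel + 1, start =>
    if start < data_cols then
      (pvPick header
          (0 :: PySem.List.pyRange (1 + start) (1 + min (start + max_data_cols) data_cols) 1)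
        :: body.map (fun row =>
          pvPick row
            (0 :: PySem.List.pyRange (1 + start) (1 + min (start + max_data_cols) data_cols) 1)))
        :: pvLoopA header body data_cols max_data_cols fuel (min (start + max_data_cols) data_cols)
    else []

def split_table_by_columns (rows : List (List String)) (max_data_cols : Int) :
    List (List (List String)) :=
  match rows with
  | [] => []  -- rows[0] raises IndexError in Python; excluded by Pre_
  | header :: body =>
    let data_cols : Int := (header.length : Int) - 1
    pvLoopA header body data_cols max_data_cols data_cols.toNat 0

-- ===== PORT B =====
-- row[:1] + row[1+s:1+e]
def pvRowSlices (row : List String) (se : Int × Int) : List String :=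
  PySem.List.slice row (some 0) (some 1) ++
    PySem.List.slice row (some (1 + se.1)) (some (1 + se.2))

def split_table_by_columns_alt (rows : List (List String)) (max_data_cols : Int) :
    List (List (List String)) :=
  match rows with
  | [] => []  -- rows[0] raises IndexError in Python; excluded by Pre_
  | header :: _ =>
    let data_cols : Int := (header.length : Int) - 1
    if data_cols ≤ 0 then []
    else
      let bounds := (PySem.List.pyRange 0 data_cols max_data_cols).map
        (fun s => (s, min (s + max_data_cols) data_cols))
      rows.foldl
        (fun tables row =>
          List.zipWith (fun table se => table ++ [pvRowSlices row se]) tables bounds)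
        (bounds.map (fun _ => []))

-- ===== PRECONDITION & SPEC =====
-- Pre_ excludes only inputs where A never returns: empty rows (rows[0] raises IndexError)
-- and max_data_cols ≤ 0 with at least two header columns (A's while loop never advances).
def Pre_split_table_by_columns (rows : List (List String)) (max_data_cols : Int) : Prop :=
  rows ≠ [] ∧ (0 < max_data_cols ∨ (rows.headD []).length ≤ 1)
instance (rows : List (List String)) (max_data_cols : Int) : Decidable (Pre_split_table_by_columns rows max_data_cols) := by unfold Pre_split_table_by_columns; infer_instance

def pvWitness_split_table_by_columns : List (List String) × Int :=
  ([["h", "a", "b", "c"], ["r", "1", "2", "3"], ["q", "9"]], 2)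

def Spec_split_table_by_columns (rows : List (List String)) (max_data_cols : Int) (out : List (List (List String))) : Prop := out = split_table_by_columns_alt rows max_data_cols
instance (rows : List (List String)) (max_data_cols : Int) (out : List (List (List String))) : Decidable (Spec_split_table_by_columns rows max_data_cols out) := by unfold Spec_split_table_by_columns; infer_instance

-- ===== CLAIM (what is proved, stated in full; the proofs are below) =====
def Claim_equal_split_table_by_columns : Prop := ∀ (rows : List (List String)) (max_data_cols : Int), Dom_split_table_by_columns rows max_data_cols → Pre_split_table_by_columns rows max_data_cols → Spec_split_table_by_columns rows max_data_cols (split_table_by_columns rows max_data_cols)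

-- ===== LEMMAS AND PROOFS =====

lemma pv_pyRange_pos_nil (a b m : Int) (hm : 0 < m) (h : b ≤ a) :
    PySem.List.pyRange a b m = [] := by
  rw [PySem.List.pyRange_of_pos a b hm]
  simp [not_lt.mpr h]

lemma pv_pyRange_pos_cons (a b m : Int) (hm : 0 < m) (h : a < b) :
    PySem.List.pyRange a b m = a :: PySem.List.pyRange (a + m) b m := by
  rw [PySem.List.pyRange_of_pos a b hm, PySem.List.pyRange_of_pos (a + m) b hm]
  have hcount : (if a < b then ((b - a + m - 1) / m).toNat else 0)
      = (if a + m < b then ((b - (a + m) + m - 1) / m).toNat else 0) + 1 := by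
    rw [if_pos h]
    have e1 : b - a + m - 1 = (b - a - 1) + 1 * m := by ring
    by_cases h2 : a + m < b
    · rw [if_pos h2]
      have e2 : b - (a + m) + m - 1 = b - a - 1 := by ring
      rw [e1, Int.add_mul_ediv_right _ _ (by omega : m ≠ 0), e2]
      have hnn : 0 ≤ (b - a - 1) / m := Int.ediv_nonneg (by omega) (by omega)
      omega
    · rw [if_neg h2]
      rw [e1, Int.add_mul_ediv_right _ _ (by omega : m ≠ 0)]
      have hz : (b - a - 1) / m = 0 := Int.ediv_eq_zero_of_lt (by omega) (by omega)
      omega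
  rw [hcount, List.range_succ_eq_map, List.map_cons, List.map_map]
  have hf : ((fun k : Nat => a + m * (k : Int)) ∘ Nat.succ)
      = fun k : Nat => (a + m) + m * (k : Int) := by
    funext k
    simp only [Function.comp_apply]
    push_cast
    ring
  rw [hf]
  norm_num

lemma pv_pick_range (row : List String) (k : Nat) :
    ∀ a : Nat,
      ((PySem.List.pyRange (a : Int) ((a : Int) + (k : Int)) 1).filter
          (fun i => decide (i < (row.length : Int)))).map
        (fun i => PySem.List.pyGetD row i "")
      = (row.drop a).take k := by
  induction k with
  | zero =>
    intro a
    simp [PySem.List.pyRange_one_eq_nil]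
  | succ k ih =>
    intro a
    rw [PySem.List.pyRange_one_cons (by push_cast; omega)]
    have htail : PySem.List.pyRange ((a : Int) + 1) ((a : Int) + ((k : Nat) + 1 : Nat)) 1
        = PySem.List.pyRange ((a + 1 : Nat) : Int) (((a + 1 : Nat) : Int) + (k : Int)) 1 := by
      push_cast
      ring_nf
    rw [List.filter_cons]
    by_cases ha : a < row.length
    · rw [if_pos (by simpa using (by exact_mod_cast ha : (a : Int) < (row.length : Int)))]
      rw [List.map_cons, htail, ih (a + 1)]
      have hd : List.drop a row = row[a] :: List.drop (a + 1) row :=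
        (List.getElem_cons_drop ha).symm
      rw [hd, List.take_succ_cons]
      congr 1
      simp [List.getD_eq_getElem?_getD, List.getElem?_eq_getElem ha]
    · rw [if_neg (by simp; exact_mod_cast Nat.le_of_not_lt ha)]
      rw [htail, ih (a + 1)]
      rw [List.drop_eq_nil_of_le (Nat.le_of_not_lt ha)]
      simp
      omega
lemma pv_pick_eq (row : List String) (s e : Int) (hs : 0 ≤ s) (hse : s ≤ e) :
    pvPick row (0 :: PySem.List.pyRange (1 + s) (1 + e) 1) = pvRowSlices row (s, e) := by
  unfold pvPick pvRowSlices
  have ha : (1 + s) = (((1 + s).toNat : Nat) : Int) := by omega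
  have hk : (1 + e) = (((1 + s).toNat : Nat) : Int) + (((e - s).toNat : Nat) : Int) := by omega
  rw [List.filter_cons, ha, hk, PySem.List.slice_natCast_add]
  cases row with
  | nil =>
    rw [if_neg (by norm_num), pv_pick_range ([] : List String) (e - s).toNat (1 + s).toNat,
      PySem.List.slice_zero_start, PySem.List.slice_to _ (by omega : (0:Int) ≤ 1)]
    simp
  | cons r rs =>
    rw [if_pos (by simp), List.map_cons,
      pv_pick_range (r :: rs) (e - s).toNat (1 + s).toNat]
    have h1 : PySem.List.slice (r :: rs) (some 0) (some 1) = [r] := by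
      rw [PySem.List.slice_zero_start, PySem.List.slice_to _ (by omega : (0:Int) ≤ 1)]
      rfl
    rw [h1]
    congr 1
    simp [PySem.List.pyGetD_zero_cons]

lemma pv_altB_cons (header : List String) (body : List (List String)) (m : Int) :
    split_table_by_columns_alt (header :: body) m
      = if (header.length : Int) - 1 ≤ 0 then []
        else
          (header :: body).foldl
            (fun tables row =>
              List.zipWith (fun table se => table ++ [pvRowSlices row se]) tables
                ((PySem.List.pyRange 0 ((header.length : Int) - 1) m).map
                  (fun s => (s, min (s + m) ((header.length : Int) - 1)))))
            (((PySem.List.pyRange 0 ((header.length : Int) - 1) m).map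
                (fun s => (s, min (s + m) ((header.length : Int) - 1)))).map
              (fun _ => [])) := rfl

lemma pv_foldB (rws : List (List String)) (bounds : List (Int × Int))
    (g : Int × Int → List (List String)) :
    rws.foldl
        (fun tables row =>
          List.zipWith (fun table se => table ++ [pvRowSlices row se]) tables bounds)
        (bounds.map g)
      = bounds.map (fun se => g se ++ rws.map (fun row => pvRowSlices row se)) := by
  induction rws generalizing g with
  | nil => simp
  | cons r rws ih =>
    rw [List.foldl_cons, List.zipWith_map_left, List.zipWith_self,
      ih (fun se => g se ++ [pvRowSlices r se])]
    simp [List.append_assoc]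

lemma pv_loopA_eq (header : List String) (body : List (List String)) (dc m : Int)
    (hm : 0 < m) :
    ∀ (fuel : Nat) (start : Int), 0 ≤ start → (dc - start).toNat ≤ fuel →
      pvLoopA header body dc m fuel start
        = (PySem.List.pyRange start dc m).map
            (fun s =>
              pvPick header (0 :: PySem.List.pyRange (1 + s) (1 + min (s + m) dc) 1)
                :: body.map
                  (fun row =>
                    pvPick row (0 :: PySem.List.pyRange (1 + s) (1 + min (s + m) dc) 1))) := by
  intro fuel
  induction fuel with
  | zero =>
    intro start h0 hf
    rw [pv_pyRange_pos_nil _ _ _ hm (by omega)]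
    rfl
  | succ fuel ih =>
    intro start h0 hf
    by_cases h : start < dc
    · rw [pv_pyRange_pos_cons start dc m hm h, List.map_cons]
      simp only [pvLoopA]
      rw [if_pos h]
      rw [ih (min (start + m) dc) (by omega) (by omega)]
      by_cases h2 : start + m ≤ dc
      · rw [(by omega : min (start + m) dc = start + m)]
      · rw [(by omega : min (start + m) dc = dc),
          pv_pyRange_pos_nil dc dc m hm le_rfl,
          pv_pyRange_pos_nil (start + m) dc m hm (by omega)]
    · simp only [pvLoopA]
      rw [if_neg h, pv_pyRange_pos_nil _ _ _ hm (by omega)]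
      simp

-- ===== VERDICT (by name: the statement is the Claim_ definition above) =====
theorem split_table_by_columns_spec : Claim_equal_split_table_by_columns := by
  intro rows m _hdom hpre
  unfold Spec_split_table_by_columns
  obtain ⟨hne, hcase⟩ := hpre
  match rows with
  | [] => exact absurd rfl hne
  | header :: body =>
    show pvLoopA header body ((header.length : Int) - 1) m ((header.length : Int) - 1).toNat 0
        = split_table_by_columns_alt (header :: body) m
    rw [pv_altB_cons]
    by_cases hdc : (header.length : Int) - 1 ≤ 0
    · rw [if_pos hdc, (by omega : ((header.length : Int) - 1).toNat = 0)]
      rfl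
    · have hm : 0 < m := by
        rcases hcase with h | h
        · exact h
        · exfalso
          simp only [List.headD_cons] at h
          omega
      rw [if_neg hdc]
      rw [pv_loopA_eq header body ((header.length : Int) - 1) m hm
        ((header.length : Int) - 1).toNat 0 le_rfl (by omega)]
      rw [pv_foldB (header :: body) _ (fun _ => [])]
      simp only [List.map_map, List.nil_append]
      apply List.map_congr_left
      intro s hs
      obtain ⟨hs0, hsdc, -⟩ := (PySem.List.mem_pyRange_iff_of_pos hm s).mp hs
      have hse : s ≤ min (s + m) ((header.length : Int) - 1) := by omega
      simp only [Function.comp_apply, List.map_cons]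
      exact List.cons_eq_cons.mpr
        ⟨pv_pick_eq header s _ hs0 hse,
          List.map_congr_left fun row _ => pv_pick_eq row s _ hs0 hse⟩
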